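-- pv_equiv track=rewrite | github.com/gabriel-alexandru/ACSAI-21-22-Programming | HW8-req/program01.py | getHRect
-- ===== SOURCE A (Python) =====
-- def getNextMove(color, move, level):
--    if level == 2:
--       nextMove = (color, move)
--    else:
--       nextMove = (color, *move)
--    return nextMove
--
-- def getCombinations(colors, level):
--    combinations = []
--    if level <= 1:
--       return tuple(colors)
--
--    for color in colors:
--       nextMoves = getCombinations(colors, level - 1)
--       for move in nextMoves:
--          combinations.append(getNextMove(color, move, level))
--    return combinations
--
-- def getCombinationsRect(colors, level):
--    tmp = getCombinations(colors, level)
--    combinations = []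
--    for combination in tmp:
--       valid = False
--       for i in range(len(combination) - 1):
--          if combination[i] != combination[i + 1]:
--             valid = True
--          else:
--             valid = False
--             break
--       if valid:
--          combinations.append(combination)
--    return combinations
--
-- def getHRect(colors, D):
--    images = []
--    combinations = getCombinationsRect(colors, D)
--
--    for combination in combinations:
--       image = []
--       for color in combination:
--          image.append(tuple([color] * D))
--
--       images.append(tuple(image))
--    return images
-- ===== SOURCE B (Python) =====
-- def getHRect(colors, D):
--     # Iterative frontier expansion: keep only the adjacent-distinct sequences (with their last
--     # color) and extend them level by level, in the same lexicographic order A produces.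
--     frontier = [([c], c) for c in colors]
--     step = 1
--     while step < D and frontier:
--         frontier = [(seq + [c], c) for seq, last in frontier for c in colors if c != last]
--         step += 1
--     return [tuple(tuple([x] * D) for x in seq) for seq, last in frontier]
-- ===== Notes on version B (the rewrite author's own statement) =====
-- stated objective: alternative
-- what changed: A enumerates all c^D color sequences recursively (recomputing the sub-enumeration for every color) and then filters out those with equal adjacent colors; B never builds invalid sequences: it keeps a frontier of (sequence, last color) pairs and extends it level by level with distinct-adjacent colors only, producing the same list in the same lexicographic order.
import Mathlib
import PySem

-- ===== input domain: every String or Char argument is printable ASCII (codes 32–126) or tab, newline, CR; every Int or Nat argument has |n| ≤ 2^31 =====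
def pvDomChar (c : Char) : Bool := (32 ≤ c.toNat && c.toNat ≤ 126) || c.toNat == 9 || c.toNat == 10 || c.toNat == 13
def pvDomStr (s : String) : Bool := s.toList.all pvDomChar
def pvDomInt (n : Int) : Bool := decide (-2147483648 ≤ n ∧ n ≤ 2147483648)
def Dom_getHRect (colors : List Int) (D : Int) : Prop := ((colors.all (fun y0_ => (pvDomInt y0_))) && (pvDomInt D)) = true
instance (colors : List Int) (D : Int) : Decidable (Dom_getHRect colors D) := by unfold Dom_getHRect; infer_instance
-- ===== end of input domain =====

-- B replaces A's enumerate-all-sequences-then-filter by iterative frontier expansion that builds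
-- only the adjacent-distinct sequences, in the same lexicographic order (objective: alternative).

-- ===== PORT A =====
-- Python's getNextMove distinguishes level == 2 because there `move` is a bare int, not a tuple;
-- with the uniform list encoding of tuples both branches build `color :: move`.
def getNextMove (color : Int) (move : List Int) (level : Int) : List Int :=
  if level = 2 then color :: move else color :: move

def getCombinations (colors : List Int) (level : Int) : List (List Int) :=
  if level ≤ 1 then colors.map (fun c => [c])  -- tuple(colors): one int per entry, encoded [c]
  else colors.foldl (fun combinations color =>
    combinations ++ (getCombinations colors (level - 1)).map
      (fun move => getNextMove color move level)) []
termination_by level.toNat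
decreasing_by omega

-- the inner `valid` loop with its break, as a structural recursion over the combination
def checkValid : List Int → Bool → Bool
  | x :: y :: rest, _ => if x ≠ y then checkValid (y :: rest) true else false
  | _, valid => valid

def getCombinationsRect (colors : List Int) (level : Int) : List (List Int) :=
  (getCombinations colors level).foldl (fun combinations combination =>
    if checkValid combination false then combinations ++ [combination] else combinations) []

def getHRect (colors : List Int) (D : Int) : List (List (List Int)) :=
  (getCombinationsRect colors D).foldl (fun images combination =>
    images ++ [combination.map (fun color => List.replicate D.toNat color)]) []

-- ===== PORT B =====
-- one expansion step: [(seq + [c], c) for seq, last in frontier for c in colors if c != last]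
def bStep (colors : List Int) (frontier : List (List Int × Int)) : List (List Int × Int) :=
  frontier.flatMap (fun p =>
    (colors.filter (fun c => c ≠ p.2)).map (fun c => (p.1 ++ [c], c)))

-- the `while step < D and frontier:` loop
def bLoop (colors : List Int) (frontier : List (List Int × Int)) (step : Int) (D : Int) :
    List (List Int × Int) :=
  if step < D ∧ frontier ≠ [] then bLoop colors (bStep colors frontier) (step + 1) D
  else frontier
termination_by (D - step).toNat
decreasing_by omega

def getHRect_alt (colors : List Int) (D : Int) : List (List (List Int)) :=
  (bLoop colors (colors.map (fun c => ([c], c))) 1 D).map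
    (fun p => p.1.map (fun x => List.replicate D.toNat x))

-- ===== PRECONDITION & SPEC =====
-- Pre_ excludes exactly the inputs on which A raises TypeError (D ≤ 1 with nonempty colors:
-- getCombinations then returns bare ints and the len() of an int fails); on every input where A
-- returns a value, Pre_ holds.
def Pre_getHRect (colors : List Int) (D : Int) : Prop := 2 ≤ D ∨ colors = []
instance (colors : List Int) (D : Int) : Decidable (Pre_getHRect colors D) := by
  unfold Pre_getHRect; infer_instance

def pvWitness_getHRect : List Int × Int := ([1, 2], 2)

def Spec_getHRect (colors : List Int) (D : Int) (out : List (List (List Int))) : Prop :=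
  out = getHRect_alt colors D
instance (colors : List Int) (D : Int) (out : List (List (List Int))) :
    Decidable (Spec_getHRect colors D out) := by unfold Spec_getHRect; infer_instance

-- ===== CLAIM (what is proved, stated in full; the proofs are below) =====
def Claim_equal_getHRect : Prop := ∀ (colors : List Int) (D : Int),
  Dom_getHRect colors D → Pre_getHRect colors D → Spec_getHRect colors D (getHRect colors D)

-- ===== LEMMAS AND PROOFS =====

-- all length-n sequences over colors, in A's lexicographic generation order
def genSeqs (colors : List Int) : Nat → List (List Int)
  | 0 => [[]]
  | n + 1 => colors.flatMap (fun c => (genSeqs colors n).map (fun t => c :: t))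

-- "every element differs from its predecessor, starting from last"
def adjOK (last : Int) : List Int → Bool
  | [] => true
  | c :: r => if c ≠ last then adjOK c r else false

theorem getNextMove_eq (color : Int) (move : List Int) (level : Int) :
    getNextMove color move level = color :: move := by
  unfold getNextMove; split <;> rfl

theorem getCombinations_eq (colors : List Int) (n : Nat) :
    ∀ (level : Int), 1 ≤ level → level.toNat = n →
      getCombinations colors level = genSeqs colors n := by
  induction n with
  | zero => intro level h1 h2; omega
  | succ m ih =>
    intro level h1 h2
    rw [getCombinations]
    split
    · have hm : m = 0 := by omega
      subst hm
      simp [genSeqs, List.map_eq_flatMap]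
    · have hrec := ih (level - 1) (by omega) (by omega)
      rw [PySem.List.foldl_append_eq_flatMap, hrec, genSeqs]
      simp only [List.nil_append]
      exact List.flatMap_congr (fun c _ => by simp [getNextMove_eq])

theorem checkValid_true (r : List Int) : ∀ y : Int, checkValid (y :: r) true = adjOK y r := by
  induction r with
  | nil => intro y; rfl
  | cons z r' ih =>
    intro y
    by_cases h : y = z
    · subst h; simp [checkValid, adjOK]
    · simp [checkValid, adjOK, h, Ne.symm h, ih]

theorem checkValid_cons_cons (x y : Int) (r : List Int) :
    checkValid (x :: y :: r) false = adjOK x (y :: r) := by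
  by_cases h : x = y
  · subst h; simp [checkValid, adjOK]
  · simp [checkValid, adjOK, h, Ne.symm h, checkValid_true]

theorem length_mem_genSeqs (colors : List Int) (n : Nat) :
    ∀ t ∈ genSeqs colors n, t.length = n := by
  induction n with
  | zero => intro t ht; simp [genSeqs] at ht; simp [ht]
  | succ m ih =>
    intro t ht
    simp only [genSeqs, List.mem_flatMap, List.mem_map] at ht
    obtain ⟨c, _, t', ht', rfl⟩ := ht
    simp [ih t' ht']

theorem flatMap_filter {α β : Type} (l : List α) (p : α → Bool) (f : α → List β) :
    (l.filter p).flatMap f = l.flatMap (fun x => if p x then f x else []) := by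
  induction l with
  | nil => rfl
  | cons a l ih =>
    by_cases h : p a <;> simp [h, ih]

-- snoc view of the full enumeration: extend by a last color instead of a first one
theorem genSeqs_snoc (colors : List Int) (n : Nat) :
    genSeqs colors (n + 1) = (genSeqs colors n).flatMap (fun t => colors.map (fun c => t ++ [c])) := by
  induction n with
  | zero => simp [genSeqs, List.map_eq_flatMap]
  | succ m ih =>
    conv_lhs => rw [genSeqs, ih]
    conv_rhs => rw [genSeqs]
    simp [List.map_flatMap, List.flatMap_assoc, List.flatMap_map, List.map_map, Function.comp_def]

theorem adjOK_concat (t : List Int) : ∀ (last c' : Int),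
    adjOK last (t ++ [c']) = (adjOK last t && c' ≠ t.getLastD last) := by
  induction t with
  | nil => intro last c'; simp [adjOK]
  | cons a r ih =>
    intro last c'
    simp only [List.cons_append, adjOK, List.getLastD_cons]
    by_cases h : a = last <;> simp [h, ih a c']

theorem bStep_nil (colors : List Int) : bStep colors [] = [] := rfl

theorem bLoop_eq_iterate (colors : List Int) (n : Nat) :
    ∀ (frontier : List (List Int × Int)) (s D : Int), (D - s).toNat = n →
      bLoop colors frontier s D = (bStep colors)^[n] frontier := by
  induction n with
  | zero =>
    intro frontier s D h
    rw [bLoop]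
    have : ¬ (s < D ∧ frontier ≠ []) := by rintro ⟨h1, -⟩; omega
    simp [this]
  | succ m ih =>
    intro frontier s D h
    rw [bLoop]
    by_cases hf : frontier = []
    · subst hf
      simp [Function.iterate_fixed (bStep_nil colors)]
    · have hs : s < D := by omega
      rw [if_pos ⟨hs, hf⟩, ih (bStep colors frontier) (s + 1) D (by omega),
          ← Function.iterate_succ_apply]
  
theorem iterate_bStep_init (colors : List Int) (n : Nat) :
    (bStep colors)^[n] (colors.map (fun c => ([c], c)))
      = colors.flatMap (fun c => ((genSeqs colors n).filter (fun t => adjOK c t)).map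
          (fun t => (c :: t, t.getLastD c))) := by
  induction n with
  | zero => simp [genSeqs, adjOK, List.map_eq_flatMap]
  | succ m ih =>
    rw [Function.iterate_succ_apply', ih]
    unfold bStep
    rw [List.flatMap_assoc]
    refine List.flatMap_congr (fun c _ => ?_)
    rw [List.flatMap_map, genSeqs_snoc, List.filter_flatMap, List.map_flatMap, flatMap_filter]
    refine List.flatMap_congr (fun t _ => ?_)
    by_cases hv : adjOK c t
    · rw [if_pos hv, List.filter_map, List.map_map]
      have h1 : (colors.filter ((fun x => adjOK c x) ∘ fun c' => t ++ [c']))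
          = colors.filter (fun c' => decide (c' ≠ t.getLastD c)) :=
        List.filter_congr (fun c' _ => by simp [Function.comp, adjOK_concat, hv])
      rw [h1]
      exact List.map_congr_left (fun c' _ => by simp [Function.comp])
    · rw [if_neg hv]
      have h0 : (colors.filter ((fun x => adjOK c x) ∘ fun c' => t ++ [c'])) = [] := by
        rw [List.filter_eq_nil_iff]
        intro c' _
        simp [Function.comp, adjOK_concat, hv]
      rw [List.filter_map, h0]
      rfl

theorem getHRect_eq_alt (colors : List Int) (D : Int) (hpre : Pre_getHRect colors D) :
    getHRect colors D = getHRect_alt colors D := by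
  by_cases h2 : 2 ≤ D
  · -- general case: both sides list the adjacent-distinct length-D sequences, imaged, in order
    obtain ⟨m, hm⟩ : ∃ m : Nat, D.toNat = m + 2 := ⟨D.toNat - 2, by omega⟩
    have hA1 : getCombinationsRect colors D
        = (genSeqs colors (m + 2)).filter (fun t => checkValid t false) := by
      unfold getCombinationsRect
      rw [getCombinations_eq colors (m + 2) D (by omega) hm]
      simpa using PySem.List.foldl_append_if (fun t => checkValid t false) id
        (genSeqs colors (m + 2)) []
    have hA2 : getHRect colors D
        = ((genSeqs colors (m + 2)).filter (fun t => checkValid t false)).map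
            (fun t => t.map (fun color => List.replicate D.toNat color)) := by
      unfold getHRect
      rw [hA1, PySem.List.foldl_append_singleton_eq_map]
      simp
    have hB : getHRect_alt colors D
        = colors.flatMap (fun c => ((genSeqs colors (m + 1)).filter (fun t => adjOK c t)).map
            (fun t => (c :: t).map (fun x => List.replicate D.toNat x))) := by
      unfold getHRect_alt
      rw [bLoop_eq_iterate colors (m + 1) _ 1 D (by omega), iterate_bStep_init,
          List.map_flatMap]
      refine List.flatMap_congr (fun c _ => ?_)
      rw [List.map_map]
      rfl
    rw [hA2, hB]
    conv_lhs => rw [genSeqs]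
    rw [List.filter_flatMap, List.map_flatMap]
    refine List.flatMap_congr (fun c _ => ?_)
    have hfl : (genSeqs colors (m + 1)).filter
          ((fun t => checkValid t false) ∘ (fun t => c :: t))
        = (genSeqs colors (m + 1)).filter (fun t => adjOK c t) := by
      refine List.filter_congr (fun t ht => ?_)
      have hlen := length_mem_genSeqs colors (m + 1) t ht
      cases t with
      | nil => simp at hlen
      | cons y r => simpa [Function.comp] using checkValid_cons_cons c y r
    rw [List.filter_map, hfl, List.map_map]
    rfl
  · -- then colors = [] and D ≤ 1: both sides are []
    have hc : colors = [] := by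
      rcases hpre with h | h
      · omega
      · exact h
    subst hc
    unfold getHRect getCombinationsRect getHRect_alt getCombinations bLoop
    split <;> simp_all

-- ===== VERDICT (by name: the statement is the Claim_ definition above) =====
theorem getHRect_spec : Claim_equal_getHRect := by
  intro colors D _ hpre
  unfold Spec_getHRect
  exact getHRect_eq_alt colors D hpre
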